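-- pv_equiv track=rewrite | github.com/ChuanzhengWei/sorghum_T2T | assembly_quality_assessment_n.py | pos2region
-- ===== SOURCE A (Python) =====
-- def pos2region(pos_n_list):
--     if not pos_n_list:
--         return []
--     pos_n_list.sort()
--     region_n = []
--     start = pos_n_list[0]
--     end = start
--     for num in pos_n_list[1:]:
--         if num == end + 1:
--             end = num
--         else:
--             region_n.append((start, end + 1))
--             start = num
--             end = start
--     region_n.append((start, end + 1))
--     return region_n
-- ===== SOURCE B (Python) =====
-- def pos2region(pos_n_list):
--     # staged approach: sort, find break indices (where adjacent values are not
--     # consecutive), then map each pair of adjacent breaks to a (start, end+1) region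
--     pos_n_list.sort()
--     n = len(pos_n_list)
--     if n == 0:
--         return []
--     breaks = [0] + [i for i in range(1, n) if pos_n_list[i] != pos_n_list[i - 1] + 1] + [n]
--     return [(pos_n_list[b], pos_n_list[e - 1] + 1) for b, e in zip(breaks, breaks[1:])]
-- ===== Notes on version B (the rewrite author's own statement) =====
-- stated objective: alternative
-- what changed: Replaced A's single-pass running (start,end) accumulator loop with a staged computation: first build the list of break indices where adjacent sorted values are not consecutive, then map each adjacent pair of break indices to a (start, end+1) region.
import Mathlib
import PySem

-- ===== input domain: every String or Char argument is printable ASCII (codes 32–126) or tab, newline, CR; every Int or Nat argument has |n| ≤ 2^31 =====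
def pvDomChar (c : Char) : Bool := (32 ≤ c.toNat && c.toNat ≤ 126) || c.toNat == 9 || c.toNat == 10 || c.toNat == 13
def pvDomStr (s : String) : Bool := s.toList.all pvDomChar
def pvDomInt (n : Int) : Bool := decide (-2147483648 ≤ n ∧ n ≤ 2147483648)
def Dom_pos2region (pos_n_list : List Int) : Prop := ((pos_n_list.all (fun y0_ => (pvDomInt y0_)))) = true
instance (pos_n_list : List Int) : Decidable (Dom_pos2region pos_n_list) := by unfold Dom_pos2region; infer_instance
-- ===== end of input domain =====

-- B replaces A's running (start,end) accumulator loop by a staged computation: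
-- sort, collect the break indices where adjacent values are not consecutive,
-- then map adjacent pairs of breaks to (start, end+1) regions (objective: alternative; same cost).
-- Both A and B sort the argument in place; the equivalence proved is about the return value.

-- ===== PORT A =====
def pos2region (pos_n_list : List Int) : List (Int × Int) :=
  if pos_n_list = [] then []
  else
    match PySem.List.sorted pos_n_list (fun x => x) false with
    | [] => []
    | start0 :: rest =>
      let st := rest.foldl
        (fun (s : List (Int × Int) × Int × Int) num =>
          if num = s.2.2 + 1 then (s.1, s.2.1, num)
          else (s.1 ++ [(s.2.1, s.2.2 + 1)], num, num))
        ([], start0, start0)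
      st.1 ++ [(st.2.1, st.2.2 + 1)]

-- ===== PORT B =====
def pos2region_alt (pos_n_list : List Int) : List (Int × Int) :=
  let s := PySem.List.sorted pos_n_list (fun x => x) false
  let n := s.length
  if n = 0 then []
  else
    let breaks : List Nat :=
      0 :: (((List.range' 1 (n - 1)).filter (fun i => s[i]! != s[i - 1]! + 1)) ++ [n])
    (breaks.zip breaks.tail).map (fun p => (s[p.1]!, s[p.2 - 1]! + 1))

-- ===== PRECONDITION & SPEC =====
def Spec_pos2region (pos_n_list : List Int) (out : List (Int × Int)) : Prop := out = pos2region_alt pos_n_list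
instance (pos_n_list : List Int) (out : List (Int × Int)) : Decidable (Spec_pos2region pos_n_list out) := by unfold Spec_pos2region; infer_instance

-- ===== CLAIM (what is proved, stated in full; the proofs are below) =====
def Claim_equal_pos2region : Prop := ∀ (pos_n_list : List Int), Dom_pos2region pos_n_list → Spec_pos2region pos_n_list (pos2region pos_n_list)

-- ===== LEMMAS AND PROOFS =====

-- common specification: grouping of a list into maximal runs of consecutive integers
def goG (start en : Int) : List Int → List (Int × Int)
  | [] => [(start, en + 1)]
  | num :: rest =>
    if num = en + 1 then goG start num rest
    else (start, en + 1) :: goG num num rest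

theorem foldA_eq (t : List Int) : ∀ (acc : List (Int × Int)) (start en : Int),
    ((t.foldl
        (fun (s : List (Int × Int) × Int × Int) num =>
          if num = s.2.2 + 1 then (s.1, s.2.1, num)
          else (s.1 ++ [(s.2.1, s.2.2 + 1)], num, num))
        (acc, start, en)).1 ++
      [((t.foldl
        (fun (s : List (Int × Int) × Int × Int) num =>
          if num = s.2.2 + 1 then (s.1, s.2.1, num)
          else (s.1 ++ [(s.2.1, s.2.2 + 1)], num, num))
        (acc, start, en)).2.1,
        (t.foldl
        (fun (s : List (Int × Int) × Int × Int) num =>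
          if num = s.2.2 + 1 then (s.1, s.2.1, num)
          else (s.1 ++ [(s.2.1, s.2.2 + 1)], num, num))
        (acc, start, en)).2.2 + 1)]) = acc ++ goG start en t := by
  induction t with
  | nil => intro acc start en; simp [goG]
  | cons num rest ih =>
    intro acc start en
    by_cases h : num = en + 1 <;> simp [goG, h, List.foldl_cons, ih]

-- the "pairs of adjacent break indices" view of B's zip-map
def pairsF (s : List Int) : Nat → List Nat → List (Int × Int)
  | _, [] => []
  | b, e :: rest => (s[b]!, s[e - 1]! + 1) :: pairsF s e rest

theorem zip_map_pairsF (s : List Int) : ∀ (l : List Nat) (b : Nat),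
    (((b :: l).zip l).map (fun p => (s[p.1]!, s[p.2 - 1]! + 1))) = pairsF s b l := by
  intro l
  induction l with
  | nil => intro b; simp [pairsF]
  | cons e rest ih =>
    intro b
    simp only [List.zip_cons_cons, List.map_cons, pairsF]
    rw [ih]

theorem pairs_goG (s : List Int) : ∀ (d i b : Nat), i < s.length → s.length - i - 1 = d →
    pairsF s b (((List.range' (i + 1) (s.length - i - 1)).filter
        (fun k => s[k]! != s[k - 1]! + 1)) ++ [s.length])
      = goG (s[b]!) (s[i]!) (s.drop (i + 1)) := by
  intro d
  induction d with
  | zero =>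
    intro i b hi hd
    have hil : s.length - 1 = i := by omega
    have hdrop : s.drop (i + 1) = [] := List.drop_eq_nil_of_le (by omega)
    rw [hdrop, hd]
    simp [pairsF, goG, hil]
  | succ d ih =>
    intro i b hi hd
    have hi1 : i + 1 < s.length := by omega
    have e1 : s[i + 1]! = s[i + 1] := getElem!_pos s (i + 1) hi1
    have e0 : s[i]! = s[i] := getElem!_pos s i hi
    have hidx : (i + 1) - 1 = i := by omega
    have hdrop : s.drop (i + 1) = s[i + 1] :: s.drop (i + 2) := List.drop_eq_getElem_cons hi1
    have hd2 : s.length - (i + 1) - 1 = d := by omega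
    have hrange : List.range' (i + 1) (s.length - i - 1)
        = (i + 1) :: List.range' (i + 2) (s.length - (i + 1) - 1) := by
      rw [hd, hd2, List.range'_succ]
    rw [hdrop, hrange]
    by_cases hb : s[i + 1] = s[i] + 1
    · -- no break at i+1
      rw [List.filter_cons_of_neg (by rw [hidx, e1, e0]; simp [hb])]
      rw [ih (i + 1) b hi1 hd2]
      simp only [goG]
      rw [e1, e0, if_pos hb, hb]
    · -- break at i+1
      rw [List.filter_cons_of_pos (by rw [hidx, e1, e0]; simp [hb])]
      simp only [List.cons_append, pairsF]
      rw [ih (i + 1) (i + 1) hi1 hd2, hidx]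
      simp only [goG]
      rw [e1, e0, if_neg hb]

theorem pos2region_spec : Claim_equal_pos2region := by
  unfold Claim_equal_pos2region
  intro l _
  unfold Spec_pos2region pos2region pos2region_alt
  by_cases hl : l = []
  · subst hl
    simp [PySem.List.sorted]
  · rw [if_neg hl]
    have hlen : (PySem.List.sorted l (fun x => x) false).length = l.length :=
      PySem.List.length_sorted ..
    have hne : l.length ≠ 0 := fun h => hl (List.eq_nil_of_length_eq_zero h)
    match hs : PySem.List.sorted l (fun x => x) false with
    | [] =>
      exfalso
      rw [hs] at hlen
      exact hne hlen.symm
    | start0 :: rest =>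
      simp only []
      rw [if_neg (by simp)]
      set s := start0 :: rest with hsdef
      simp only [List.tail_cons]
      rw [zip_map_pairsF s]
      have h0 : (0 : Nat) < s.length := by simp [hsdef]
      have := pairs_goG s (s.length - 0 - 1) 0 0 h0 rfl
      simp only [Nat.zero_add] at this
      have hn01 : s.length - 0 - 1 = s.length - 1 := by omega
      rw [hn01] at this
      rw [this]
      have h0' : s[0]! = start0 := by simp [hsdef]
      rw [h0']
      simp only [hsdef, List.drop_succ_cons, List.drop_zero]
      simpa using foldA_eq rest [] start0 start0
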